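-- pv_equiv track=rewrite | github.com/ultrapotato/MergeAlign-Reimplementation-and-Benchmark | MergeAlign.py | convert_to_indices
-- ===== SOURCE A (Python) =====
-- def convert_to_indices(sequence):
--     """Convert sequence to position indices"""
--     indices = []
--     pos = 0
--     for char in sequence:
--         if char != '-':
--             pos += 1
--         indices.append(pos)
--     return indices
-- ===== SOURCE B (Python) =====
-- def convert_to_indices(sequence):
--     """Convert sequence to position indices"""
--     gaps = [i for i, c in enumerate(sequence) if c == '-']
--
--     def rank(x):
--         # number of gap positions <= x: binary search (bisect_right) on the sorted gap list
--         lo, hi = 0, len(gaps)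
--         while lo < hi:
--             mid = (lo + hi) // 2
--             if x < gaps[mid]:
--                 hi = mid
--             else:
--                 lo = mid + 1
--         return lo
--
--     return [i + 1 - rank(i) for i in range(len(sequence))]
-- ===== Notes on version B (the rewrite author's own statement) =====
-- stated objective: alternative
-- what changed: Instead of a running non-gap counter appended per character, B builds the sorted list of gap positions once and computes each output element by the closed form i+1 minus the number of gaps at positions <= i, obtained by a hand-written binary search (bisect_right) over that list.
import Mathlib
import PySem

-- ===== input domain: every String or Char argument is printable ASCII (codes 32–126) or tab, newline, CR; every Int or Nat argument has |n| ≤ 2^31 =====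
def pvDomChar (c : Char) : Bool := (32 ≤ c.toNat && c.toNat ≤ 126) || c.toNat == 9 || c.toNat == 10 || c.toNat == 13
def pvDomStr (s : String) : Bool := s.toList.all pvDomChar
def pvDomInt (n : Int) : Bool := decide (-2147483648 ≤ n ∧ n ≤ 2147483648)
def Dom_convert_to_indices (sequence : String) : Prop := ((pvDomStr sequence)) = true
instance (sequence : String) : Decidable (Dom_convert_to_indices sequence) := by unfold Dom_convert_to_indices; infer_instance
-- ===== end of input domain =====

-- B computes each element by the closed form i+1 - (number of gap positions ≤ i), found by binary
-- search over the once-built sorted gap-position list, instead of A's running counter (alternative algorithm).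

-- ===== PORT A =====
-- A: one loop carrying (pos, indices); increment pos on a non-gap char, append pos each step.
def convert_to_indices (sequence : String) : List Int :=
  (sequence.toList.foldl
    (fun (st : List Int × Int) c =>
      let pos := if c ≠ '-' then st.2 + 1 else st.2
      (st.1 ++ [pos], pos))
    ([], 0)).1

-- ===== PORT B =====
-- B helper: the inner `rank` binary search (lo/hi are list indices, always ≥ 0, hence Nat).
def pvRank (gaps : List Int) (x : Int) (lo hi : Nat) : Nat :=
  if _h : lo < hi then
    if x < gaps.getD ((lo + hi) / 2) 0 then pvRank gaps x lo ((lo + hi) / 2)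
    else pvRank gaps x ((lo + hi) / 2 + 1) hi
  else lo
termination_by hi - lo
decreasing_by all_goals omega

def convert_to_indices_alt (sequence : String) : List Int :=
  let gaps := ((PySem.List.enumerate sequence.toList).filter (fun p => p.2 == '-')).map (fun p => p.1)
  (PySem.List.pyRange 0 (sequence.toList.length) 1).map
    (fun i => i + 1 - (pvRank gaps i 0 gaps.length : Int))

-- ===== PRECONDITION & SPEC =====
def Spec_convert_to_indices (sequence : String) (out : List Int) : Prop := out = convert_to_indices_alt sequence
instance (sequence : String) (out : List Int) : Decidable (Spec_convert_to_indices sequence out) := by unfold Spec_convert_to_indices; infer_instance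

-- ===== CLAIM (what is proved, stated in full; the proofs are below) =====
def Claim_equal_convert_to_indices : Prop := ∀ (sequence : String), Dom_convert_to_indices sequence → Spec_convert_to_indices sequence (convert_to_indices sequence)

-- ===== LEMMAS AND PROOFS =====

-- A's loop, output part only, as a structural recursion.
def pvARun : Int → List Char → List Int
  | _, [] => []
  | p, c :: cs => let q := if c ≠ '-' then p + 1 else p; q :: pvARun q cs

theorem pv_fold_arun (l : List Char) (acc : List Int) (p : Int) :
    (l.foldl (fun (st : List Int × Int) c =>
      let pos := if c ≠ '-' then st.2 + 1 else st.2
      (st.1 ++ [pos], pos)) (acc, p)).1 = acc ++ pvARun p l := by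
  induction l generalizing acc p with
  | nil => simp [pvARun]
  | cons c cs ih =>
    simp only [List.foldl, pvARun]
    rw [ih]
    by_cases h : c = '-' <;> simp [h, List.append_assoc]

-- closed form of A's loop: element i is p + (non-gap count of the first i+1 characters)
theorem pv_arun_closed (l : List Char) (p : Int) :
    pvARun p l = (List.range l.length).map
      (fun i => p + ((l.take (i + 1)).countP (fun c => !(c == '-')) : Int)) := by
  induction l generalizing p with
  | nil => simp [pvARun]
  | cons c cs ih =>
    simp only [pvARun, List.length_cons, List.range_succ_eq_map, List.map_cons, List.map_map]
    by_cases h : c = '-'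
    · rw [if_neg (by simp [h]), ih p]
      refine congrArg₂ _ (by simp [h]) (List.map_congr_left ?_)
      intro i _
      simp [h]
    · rw [if_pos (by simp [h]), ih (p + 1)]
      refine congrArg₂ _ (by simp [h]) (List.map_congr_left ?_)
      intro i _
      simp only [Function.comp_def, List.take_succ_cons, List.countP_cons]
      simp [h]
      ring
-- rank base case: on a list whose first lo elements are ≤ x and the rest are > x, the count of ≤ x is lo
theorem pvRank_base (a : List Int) (x : Int) (lo : Nat) (hlo : lo ≤ a.length)
    (h1 : ∀ j, j < lo → a.getD j 0 ≤ x)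
    (h2 : ∀ j, lo ≤ j → j < a.length → x < a.getD j 0) :
    a.countP (fun y => decide (y ≤ x)) = lo := by
  have hsplit : a = a.take lo ++ a.drop lo := (List.take_append_drop lo a).symm
  rw [hsplit, List.countP_append]
  have htake : (a.take lo).countP (fun y => decide (y ≤ x)) = lo := by
    rw [List.countP_eq_length.mpr, List.length_take, Nat.min_eq_left hlo]
    intro y hy
    rcases List.mem_iff_getElem.mp hy with ⟨j, hj, rfl⟩
    have hjlo : j < lo := by simp [List.length_take] at hj; omega
    have hjl : j < a.length := lt_of_lt_of_le hjlo hlo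
    rw [List.getElem_take]
    have := h1 j hjlo
    rw [List.getD_eq_getElem a 0 hjl] at this
    simpa using this
  have hdrop : (a.drop lo).countP (fun y => decide (y ≤ x)) = 0 := by
    rw [List.countP_eq_zero]
    intro y hy
    rcases List.mem_iff_getElem.mp hy with ⟨j, hj, rfl⟩
    have hjl : lo + j < a.length := by simpa [List.length_drop] using Nat.add_lt_of_lt_sub' (by simpa [List.length_drop] using hj)
    rw [List.getElem_drop]
    have := h2 (lo + j) (Nat.le_add_right _ _) hjl
    rw [List.getD_eq_getElem a 0 hjl] at this
    simpa using not_le_of_gt this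
  omega

-- binary search = rank: pvRank equals the count of elements ≤ x in a strictly sorted list
theorem pvRank_spec (fuel : Nat) (a : List Int) (x : Int) (lo hi : Nat)
    (hfl : hi - lo ≤ fuel)
    (hs : a.Pairwise (· < ·)) (hhi : hi ≤ a.length) (hlh : lo ≤ hi)
    (h1 : ∀ j, j < lo → a.getD j 0 ≤ x)
    (h2 : ∀ j, hi ≤ j → j < a.length → x < a.getD j 0) :
    pvRank a x lo hi = a.countP (fun y => decide (y ≤ x)) := by
  have hpair : ∀ i j, i < a.length → j < a.length → i < j → a.getD i 0 < a.getD j 0 := by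
    intro i j hil hjl hij
    rw [List.getD_eq_getElem a 0 hil, List.getD_eq_getElem a 0 hjl]
    exact List.pairwise_iff_getElem.mp hs i j hil hjl hij
  induction fuel generalizing lo hi with
  | zero =>
    have hle : lo = hi := by omega
    rw [pvRank, dif_neg (by omega)]
    exact (pvRank_base a x lo (hle ▸ hhi) h1 (fun j hj hjl => h2 j (hle ▸ hj) hjl)).symm
  | succ n ih =>
    rw [pvRank]
    by_cases hlt : lo < hi
    · rw [dif_pos hlt]
      by_cases hx : x < a.getD ((lo + hi) / 2) 0
      · rw [if_pos hx]
        refine ih lo ((lo + hi) / 2) (by omega) (by omega) (by omega) h1 ?_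
        intro j hj hjl
        rcases Nat.eq_or_lt_of_le hj with h | h
        · exact h ▸ hx
        · exact lt_trans hx (hpair _ _ (by omega) hjl h)
      · rw [if_neg hx]
        rw [not_lt] at hx
        refine ih ((lo + hi) / 2 + 1) hi (by omega) hhi (by omega) ?_ h2
        intro j hj
        rcases Nat.lt_succ_iff_lt_or_eq.mp hj with h | h
        · exact le_of_lt (lt_of_lt_of_le (hpair _ _ (by omega) (by omega) h) hx)
        · exact h ▸ hx
    · rw [dif_neg hlt]
      have hle : lo = hi := by omega
      exact (pvRank_base a x lo (hle ▸ hhi) h1 (fun j hj hjl => h2 j (hle ▸ hj) hjl)).symm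

-- the gap-position list is strictly increasing
theorem pv_gaps_sorted (l : List Char) :
    ((((PySem.List.enumerate l).filter (fun p => p.2 == '-')).map (fun p => p.1)) : List Int).Pairwise (· < ·) := by
  rw [List.pairwise_map]
  exact List.Pairwise.filter _ (PySem.List.pairwise_lt_enumerate l 0)

-- counting the gap positions ≤ i = counting the gaps among the first i+1 characters
theorem pv_enum_count_snd (l : List Char) (s : Int) :
    (PySem.List.enumerate l s).countP (fun p => p.2 == '-') = l.countP (fun c => c == '-') := by
  induction l generalizing s with
  | nil => simp [PySem.List.enumerate_nil]
  | cons c cs ih => simp [PySem.List.enumerate_cons, List.countP_cons, ih]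

theorem pv_gaps_count (l : List Char) (i : Nat) :
    ((((PySem.List.enumerate l).filter (fun p => p.2 == '-')).map (fun p => p.1)) : List Int).countP
        (fun y => decide (y ≤ (i : Int)))
      = (l.take (i + 1)).countP (fun c => c == '-') := by
  rw [List.countP_map, List.countP_filter]
  have hsplit : l = l.take (i + 1) ++ l.drop (i + 1) := (List.take_append_drop (i + 1) l).symm
  conv_lhs => rw [hsplit]
  rw [PySem.List.enumerate_append, List.countP_append]
  have h1 : (PySem.List.enumerate (l.take (i + 1)) 0).countP
      (fun p => ((fun y => decide (y ≤ (i : Int))) ∘ (fun p => p.1)) p && p.2 == '-')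
      = (l.take (i + 1)).countP (fun c => c == '-') := by
    rw [List.countP_congr, pv_enum_count_snd]
    intro p hp
    rcases (PySem.List.mem_enumerate_iff _ _ _).mp hp with ⟨k, hk, rfl⟩
    have hki : k ≤ i := by
      have : k < (l.take (i + 1)).length := hk
      simp [List.length_take] at this
      omega
    simp
    omega
  have h2 : (PySem.List.enumerate (l.drop (i + 1)) (0 + (l.take (i + 1)).length)).countP
      (fun p => ((fun y => decide (y ≤ (i : Int))) ∘ (fun p => p.1)) p && p.2 == '-') = 0 := by
    rw [List.countP_eq_zero]
    intro p hp
    rcases (PySem.List.mem_enumerate_iff _ _ _).mp hp with ⟨k, hk, rfl⟩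
    have hlen : i + 1 ≤ l.length := by
      have : k < (l.drop (i + 1)).length := hk
      simp [List.length_drop] at this
      omega
    have : (l.take (i + 1)).length = i + 1 := by simp [List.length_take]; omega
    simp [this]
    omega
  rw [h1, h2]
  simp

-- ===== VERDICT (by name: the statement is the Claim_ definition above) =====
theorem convert_to_indices_spec : Claim_equal_convert_to_indices := by
  intro s _
  show _ = _
  unfold convert_to_indices convert_to_indices_alt
  rw [pv_fold_arun, List.nil_append, pv_arun_closed, PySem.List.pyRange_one]
  simp only [Int.sub_zero, Int.toNat_natCast, List.map_map]
  refine List.map_congr_left ?_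
  intro i hi
  have hin : i < s.toList.length := List.mem_range.mp hi
  set gaps : List Int := ((PySem.List.enumerate s.toList).filter (fun p => p.2 == '-')).map (fun p => p.1) with hg
  have hrank : pvRank gaps (i : Int) 0 gaps.length
      = gaps.countP (fun y => decide (y ≤ (i : Int))) :=
    pvRank_spec gaps.length gaps (i : Int) 0 gaps.length (by omega)
      (pv_gaps_sorted s.toList) (le_refl _) (Nat.zero_le _)
      (fun j h => absurd h (by omega)) (fun j h h' => absurd h' (by omega))
  have htlen : (s.toList.take (i + 1)).length = i + 1 := by rw [List.length_take]; omega
  have hsum := List.length_eq_countP_add_countP (fun c : Char => c == '-') (l := s.toList.take (i + 1))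
  rw [htlen] at hsum
  have hcnt : (s.toList.take (i + 1)).countP (fun c => !(c == '-'))
      = i + 1 - (s.toList.take (i + 1)).countP (fun c => c == '-') := by
    have : (s.toList.take (i + 1)).countP (fun c : Char => decide ¬(c == '-') = true)
        = (s.toList.take (i + 1)).countP (fun c => !(c == '-')) := by
      refine List.countP_congr ?_
      intro c _; by_cases h : c = '-' <;> simp [h]
    omega
  simp only [Function.comp_def, zero_add]
  rw [hrank, pv_gaps_count, hcnt]
  have hle : (s.toList.take (i + 1)).countP (fun c => c == '-') ≤ i + 1 := by omega
  push_cast [hle]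
  ring
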